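-- pv_equiv track=rewrite | github.com/SectorAlpha/AlphaGSM | scripts/generate_game_server_support_tracker.py | parse_status_sections
-- ===== SOURCE A (Python) =====
-- SECTIONS = (
--     ("PASSED", "Supported Now", "[x]"),
--     ("DISABLED", "Not Currently Supported", "[ ]"),
--     ("SKIPPED", "Waiting On Prerequisites Or Validation", "[ ]"),
-- )
--
-- IGNORED_ENTRIES = {"archive_backed_installs"}
--
-- def parse_status_sections(status_text: str) -> dict[str, list[str]]:
--     rows = {name: [] for name, _title, _checkbox in SECTIONS}
--     current_section: str | None = None
--
--     for line in status_text.splitlines():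
--         if line.startswith("## "):
--             current_section = None
--             for name, _title, _checkbox in SECTIONS:
--                 if line.startswith(f"## {name} "):
--                     current_section = name
--                     break
--             continue
--
--         if current_section is None or not line.startswith("|"):
--             continue
--         if "---" in line or "Test |" in line or "Skip reason" in line or "Type |" in line:
--             continue
--
--         parts = [part.strip() for part in line.strip("|").split("|")]
--         if not parts or not parts[0] or parts[0] in IGNORED_ENTRIES:
--             continue
--         rows[current_section].append(parts[0])
--
--     return rows
-- ===== SOURCE B (Python) =====
-- SECTIONS = (
--     ("PASSED", "Supported Now", "[x]"),
--     ("DISABLED", "Not Currently Supported", "[ ]"),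
--     ("SKIPPED", "Waiting On Prerequisites Or Validation", "[ ]"),
-- )
--
-- IGNORED_ENTRIES = {"archive_backed_installs"}
--
-- def _section_name(line):
--     for name, _title, _checkbox in SECTIONS:
--         if line.startswith(f"## {name} "):
--             return name
--     return None
--
-- def _entry_of(line):
--     if not line.startswith("|"):
--         return None
--     if "---" in line or "Test |" in line or "Skip reason" in line or "Type |" in line:
--         return None
--     parts = [part.strip() for part in line.strip("|").split("|")]
--     if not parts or not parts[0] or parts[0] in IGNORED_ENTRIES:
--         return None
--     return parts[0]
--
-- def parse_status_sections(status_text: str) -> dict[str, list[str]]: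
--     # pass 1: cut the text into contiguous segments keyed by the section header above them
--     segments = []
--     name, body = None, []
--     for line in status_text.splitlines():
--         if line.startswith("## "):
--             segments.append((name, body))
--             name, body = _section_name(line), []
--         else:
--             body.append(line)
--     segments.append((name, body))
--     # pass 2: per section, collect the entries of its segments
--     return {sec: [e for seg_name, seg_body in segments if seg_name == sec
--                   for e in map(_entry_of, seg_body) if e is not None]
--             for sec, _title, _checkbox in SECTIONS}
-- ===== Notes on version B (the rewrite author's own statement) =====
-- stated objective: alternative
-- what changed: Replaces A's single stateful line loop (current-section flag with immediate dict appends) by a two-pass decomposition: pass 1 cuts the text into (section-name-or-None, body-lines) segments at markdown section headers, pass 2 builds each section's row list from its segments' filtered entries.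
import Mathlib
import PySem

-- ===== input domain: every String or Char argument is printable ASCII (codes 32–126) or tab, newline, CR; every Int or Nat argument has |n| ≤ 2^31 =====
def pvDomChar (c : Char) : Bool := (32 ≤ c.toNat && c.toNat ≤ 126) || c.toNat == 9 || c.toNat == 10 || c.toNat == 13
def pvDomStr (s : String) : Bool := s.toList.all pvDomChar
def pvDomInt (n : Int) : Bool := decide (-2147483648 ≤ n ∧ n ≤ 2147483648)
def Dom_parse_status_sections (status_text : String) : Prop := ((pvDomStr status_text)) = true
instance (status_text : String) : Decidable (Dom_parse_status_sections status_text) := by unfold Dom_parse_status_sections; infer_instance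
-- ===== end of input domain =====

-- B replaces A's single stateful loop (current-section flag + dict appends) by a two-pass
-- decomposition: segment the lines at '## ' headers, then collect each section's entries
-- per segment; same return value, objective: alternative decomposition (not faster).

-- ===== PORT A =====
-- module-level constants shared by both Pythons
def pvSections : List (String × String × String) :=
  [("PASSED", "Supported Now", "[x]"),
   ("DISABLED", "Not Currently Supported", "[ ]"),
   ("SKIPPED", "Waiting On Prerequisites Or Validation", "[ ]")]

def pvIgnored : PySem.Set String := ["archive_backed_installs"]

-- one iteration of A's for-loop over the lines; state = (current_section, rows)
def pvStepA (st : Option String × PySem.Dict String (List String)) (line : String) :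
    Option String × PySem.Dict String (List String) :=
  if PySem.Str.startswith line "## " then
    -- inner 'for name,… in SECTIONS: if startswith: current_section = name; break'
    ((pvSections.find? (fun sec => PySem.Str.startswith line ("## " ++ sec.1 ++ " "))).map (·.1), st.2)
  else
    match st.1 with
    | none => st
    | some s =>
      if ¬ PySem.Str.startswith line "|" then st
      else if PySem.Str.isIn "---" line || PySem.Str.isIn "Test |" line
            || PySem.Str.isIn "Skip reason" line || PySem.Str.isIn "Type |" line then st
      else
        match ((PySem.Str.split? (PySem.Str.stripChars line "|") "|").getD []).map PySem.Str.strip with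
        | [] => st
        | p0 :: _ =>
          if p0 = "" then st
          else if PySem.Set.contains pvIgnored p0 then st
          else (some s, st.2.modify s [] (· ++ [p0]))

def parse_status_sections (status_text : String) : List (String × List String) :=
  let rows := pvSections.foldl (fun d sec => d.insert sec.1 ([] : List String)) PySem.Dict.empty
  (((PySem.Str.splitlines status_text).foldl pvStepA (none, rows)).2).items

-- ===== PORT B =====
-- _section_name: first SECTIONS name whose '## name ' prefixes the line
def pvSectionName (line : String) : Option String :=
  (pvSections.find? (fun sec => PySem.Str.startswith line ("## " ++ sec.1 ++ " "))).map (·.1)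

-- _entry_of: the first table field of a kept row, else None
def pvEntryOf (line : String) : Option String :=
  if ¬ PySem.Str.startswith line "|" then none
  else if PySem.Str.isIn "---" line || PySem.Str.isIn "Test |" line
        || PySem.Str.isIn "Skip reason" line || PySem.Str.isIn "Type |" line then none
  else
    match ((PySem.Str.split? (PySem.Str.stripChars line "|") "|").getD []).map PySem.Str.strip with
    | [] => none
    | p0 :: _ =>
      if p0 = "" then none
      else if PySem.Set.contains pvIgnored p0 then none
      else some p0

-- pass 1 loop body; state = (segments, name, body)
def pvStepB (st : List (Option String × List String) × Option String × List String) (line : String) :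
    List (Option String × List String) × Option String × List String :=
  if PySem.Str.startswith line "## " then
    (st.1 ++ [(st.2.1, st.2.2)], pvSectionName line, [])
  else
    (st.1, st.2.1, st.2.2 ++ [line])

def parse_status_sections_alt (status_text : String) : List (String × List String) :=
  let st := (PySem.Str.splitlines status_text).foldl pvStepB ([], none, [])
  let segments := st.1 ++ [(st.2.1, st.2.2)]
  pvSections.map (fun sec =>
    (sec.1, (segments.filter (fun seg => seg.1 == some sec.1)).flatMap
              (fun seg => seg.2.filterMap pvEntryOf)))

-- ===== PRECONDITION & SPEC =====
def Spec_parse_status_sections (status_text : String) (out : List (String × List String)) : Prop := out = parse_status_sections_alt status_text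
instance (status_text : String) (out : List (String × List String)) : Decidable (Spec_parse_status_sections status_text out) := by unfold Spec_parse_status_sections; infer_instance

-- ===== CLAIM (what is proved, stated in full; the proofs are below) =====
def Claim_equal_parse_status_sections : Prop := ∀ (status_text : String), Dom_parse_status_sections status_text → Spec_parse_status_sections status_text (parse_status_sections status_text)

-- ===== LEMMAS AND PROOFS =====

-- recursive reference form of B's pass 1
def pvSegR : List String → Option String → List String → List (Option String × List String)
  | [], cur, body => [(cur, body)]
  | l :: rest, cur, body =>
    if PySem.Str.startswith l "## " then (cur, body) :: pvSegR rest (pvSectionName l) []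
    else pvSegR rest cur (body ++ [l])

-- B's pass 2 for one section name
def pvContrib (n : String) (segs : List (Option String × List String)) : List String :=
  (segs.filter (fun seg => seg.1 == some n)).flatMap (fun seg => seg.2.filterMap pvEntryOf)

lemma pvStepB_prefix (lines : List String) : ∀ (segs : List (Option String × List String))
    (cur : Option String) (body : List String),
    lines.foldl pvStepB (segs, cur, body)
      = (segs ++ (lines.foldl pvStepB ([], cur, body)).1, (lines.foldl pvStepB ([], cur, body)).2) := by
  induction lines with
  | nil => simp
  | cons l rest ih =>
    intro segs cur body
    by_cases h : PySem.Str.startswith l "## " = true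
    · simp only [List.foldl_cons, pvStepB, h, if_pos]
      rw [ih (segs ++ [(cur, body)]), ih ([] ++ [(cur, body)])]
      simp
    · simp only [List.foldl_cons, pvStepB, h, if_neg, Bool.false_eq_true, not_false_iff]
      exact ih segs cur (body ++ [l])

lemma pvSegOf_eq_segR (lines : List String) : ∀ (cur : Option String) (body : List String),
    (lines.foldl pvStepB ([], cur, body)).1 ++
      [((lines.foldl pvStepB ([], cur, body)).2.1, (lines.foldl pvStepB ([], cur, body)).2.2)]
      = pvSegR lines cur body := by
  induction lines with
  | nil => simp [pvSegR]
  | cons l rest ih =>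
    intro cur body
    by_cases h : PySem.Str.startswith l "## " = true
    · simp only [List.foldl_cons, pvStepB, h, if_pos, pvSegR]
      rw [pvStepB_prefix]
      simpa using ih (pvSectionName l) []
    · simp only [List.foldl_cons, pvStepB, h, if_neg, Bool.false_eq_true, not_false_iff, pvSegR]
      exact ih cur (body ++ [l])

lemma pvContrib_cons (n : String) (c : Option String) (b : List String)
    (rest : List (Option String × List String)) :
    pvContrib n ((c, b) :: rest)
      = (if c == some n then b.filterMap pvEntryOf else []) ++ pvContrib n rest := by
  by_cases h : c == some n
  · simp [pvContrib, h]
  · simp [pvContrib, h]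

lemma pvContrib_body (lines : List String) : ∀ (cur : Option String) (body : List String) (n : String),
    pvContrib n (pvSegR lines cur body)
      = (if cur == some n then body.filterMap pvEntryOf else []) ++ pvContrib n (pvSegR lines cur []) := by
  induction lines with
  | nil =>
    intro cur body n
    by_cases hc : cur = some n <;> simp [pvSegR, pvContrib, hc]
  | cons l rest ih =>
    intro cur body n
    by_cases h : PySem.Str.startswith l "## " = true
    · simp only [pvSegR, h, if_pos, pvContrib_cons]
      simp
    · simp only [pvSegR, h, if_neg, Bool.false_eq_true, not_false_iff]
      simp only [List.nil_append]
      rw [ih cur (body ++ [l]) n, ih cur [l] n]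
      by_cases hc : cur == some n
      · simp [hc, List.filterMap_append]
      · simp [hc]

lemma pvStepA_nonheader (s : String) (d : PySem.Dict String (List String)) (line : String)
    (h : PySem.Str.startswith line "## " = false) :
    pvStepA (some s, d) line
      = (some s, match pvEntryOf line with
                 | none => d
                 | some e => d.modify s [] (· ++ [e])) := by
  simp only [pvStepA, pvEntryOf, h, Bool.false_eq_true, if_false]
  generalize (List.map PySem.Str.strip ((PySem.Str.split? (PySem.Str.stripChars line "|") "|").getD [])) = parts
  split_ifs <;> try rfl
  cases parts with
  | nil => rfl
  | cons p0 ps =>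
    by_cases h3 : p0 = ""
    · simp [h3]
    · by_cases h4 : p0 ∈ pvIgnored
      · simp [h3, h4]
      · simp [h3, h4]

lemma pvMain (lines : List String) : ∀ (cur : Option String) (d : PySem.Dict String (List String))
    (n : String),
    ((lines.foldl pvStepA (cur, d)).2).getD n []
      = d.getD n [] ++ pvContrib n (pvSegR lines cur []) := by
  induction lines with
  | nil =>
    intro cur d n
    simp [pvSegR, pvContrib]
  | cons l rest ih =>
    intro cur d n
    by_cases h : PySem.Str.startswith l "## " = true
    · have h' : PySem.Chars.startswith l.toList ['#', '#', ' '] = true := by simpa using h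
      have hstep : pvStepA (cur, d) l = (pvSectionName l, d) := by
        simp [pvStepA, pvSectionName, h']
      simp only [List.foldl_cons, hstep, pvSegR, h, if_pos, pvContrib_cons]
      rw [ih]
      simp
    · have hb : PySem.Str.startswith l "## " = false := by simpa using h
      simp only [List.foldl_cons, pvSegR, hb, Bool.false_eq_true, if_false, List.nil_append]
      rw [pvContrib_body rest cur [l] n]
      cases cur with
      | none =>
        have hb' : PySem.Chars.startswith l.toList ['#', '#', ' '] = false := by simpa using hb
        have hstep : pvStepA (none, d) l = (none, d) := by simp [pvStepA, hb']
        rw [hstep, ih]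
        simp
      | some s =>
        rw [pvStepA_nonheader s d l hb]
        cases hE : pvEntryOf l with
        | none =>
          rw [ih]
          have : List.filterMap pvEntryOf [l] = [] := by simp [hE]
          simp [this]
        | some e =>
          rw [ih]
          rw [PySem.Dict.getD_modify]
          have hfl : List.filterMap pvEntryOf [l] = [e] := by simp [hE]
          by_cases hn : n = s
          · subst hn
            simp [hfl]
          · have : (some s == some n) = false := by simp [Ne.symm hn]
            simp [hn, this]

lemma pvKeysRun (lines : List String) : ∀ (cur : Option String) (d : PySem.Dict String (List String)),
    (∀ s, cur = some s → d.contains s = true) →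
    (∀ sec ∈ pvSections, d.contains sec.1 = true) →
    ((lines.foldl pvStepA (cur, d)).2).keys = d.keys := by
  induction lines with
  | nil => intro cur d _ _; rfl
  | cons l rest ih =>
    intro cur d hcur hsec
    by_cases h : PySem.Str.startswith l "## " = true
    · have h' : PySem.Chars.startswith l.toList ['#', '#', ' '] = true := by simpa using h
      have hstep : pvStepA (cur, d) l = (pvSectionName l, d) := by
        simp [pvStepA, pvSectionName, h']
      rw [List.foldl_cons, hstep]
      refine ih _ _ ?_ hsec
      intro s hs
      obtain ⟨sec, hfind⟩ : ∃ sec, pvSections.find?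
          (fun sec => PySem.Str.startswith l ("## " ++ sec.1 ++ " ")) = some sec ∧ sec.1 = s := by
        unfold pvSectionName at hs
        cases hf : pvSections.find? (fun sec => PySem.Str.startswith l ("## " ++ sec.1 ++ " ")) with
        | none => rw [hf] at hs; simp at hs
        | some sec => rw [hf] at hs; simp at hs; exact ⟨sec, rfl, hs⟩
      obtain ⟨hf, rfl⟩ := hfind
      exact hsec sec (List.mem_of_find?_eq_some hf)
    · have hb : PySem.Str.startswith l "## " = false := by simpa using h
      cases cur with
      | none =>
        have hb' : PySem.Chars.startswith l.toList ['#', '#', ' '] = false := by simpa using hb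
        have hstep : pvStepA (none, d) l = (none, d) := by simp [pvStepA, hb']
        rw [List.foldl_cons, hstep]
        exact ih _ _ (by intro s hs; cases hs) hsec
      | some s =>
        rw [List.foldl_cons, pvStepA_nonheader s d l hb]
        cases hE : pvEntryOf l with
        | none => simpa using ih _ _ hcur hsec
        | some e =>
          have hcs : d.contains s = true := hcur s rfl
          have hkeys : (d.modify s ([] : List String) (· ++ [e])).keys = d.keys := by
            exact PySem.Dict.keys_insert_of_contains d (d.getD s [] ++ [e]) (hcur s rfl)
          have hcont : ∀ x, d.contains x = true → (d.modify s [] (· ++ [e])).contains x = true := by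
            intro x hx
            rw [PySem.Dict.contains_iff_mem_keys] at hx ⊢
            rwa [hkeys]
          rw [ih _ _ (by intro s' hs'; cases hs'; exact hcont s (hcur s rfl))
               (by intro sec hm; exact hcont sec.1 (hsec sec hm))]
          exact hkeys

lemma pvItemsOfKeys3 (d : PySem.Dict String (List String))
    (h : d.keys = ["PASSED", "DISABLED", "SKIPPED"]) :
    d.items = [("PASSED", d.getD "PASSED" []), ("DISABLED", d.getD "DISABLED" []),
               ("SKIPPED", d.getD "SKIPPED" [])] := by
  obtain ⟨l⟩ := d
  simp only [PySem.Dict.keys] at h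
  rcases l with _ | ⟨⟨k1, v1⟩, _ | ⟨⟨k2, v2⟩, _ | ⟨⟨k3, v3⟩, _ | ⟨p4, t⟩⟩⟩⟩ <;> simp_all
  obtain ⟨h1, h2, h3⟩ := h
  subst h1; subst h2; subst h3
  refine ⟨?_, ?_, ?_⟩ <;>
    simp [PySem.Dict.getD_eq_get?_getD, PySem.Dict.get?_mk_cons]

-- ===== VERDICT (by name: the statement is the Claim_ definition above) =====
theorem parse_status_sections_spec : Claim_equal_parse_status_sections := by
  intro t _
  unfold Spec_parse_status_sections parse_status_sections parse_status_sections_alt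
  have hd0 : pvSections.foldl (fun d sec => d.insert sec.1 ([] : List String)) PySem.Dict.empty
      = PySem.Dict.mk [("PASSED", []), ("DISABLED", []), ("SKIPPED", [])] := by rfl
  rw [hd0]
  have hkeys : (((PySem.Str.splitlines t).foldl pvStepA
      (none, PySem.Dict.mk [("PASSED", []), ("DISABLED", []), ("SKIPPED", [])])).2).keys
      = ["PASSED", "DISABLED", "SKIPPED"] := by
    rw [pvKeysRun _ _ _ (by intro s hs; cases hs) (by decide)]
    rfl
  rw [pvItemsOfKeys3 _ hkeys]
  have hseg := pvSegOf_eq_segR (PySem.Str.splitlines t) none []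
  rw [pvMain, pvMain, pvMain]
  simp only [pvSections, List.map_cons, List.map_nil, hseg]
  simp [pvContrib]
  exact ⟨by decide, by decide, by decide⟩
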